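-- pv_equiv track=rewrite | github.com/pypi-data/pypi-mirror-9 | packages/lea/lea-2.1.1.tar.gz/lea-2.1.1/leapp_translator.py | getIdentifier
-- ===== SOURCE A (Python) =====
-- import string
--
-- IDENTIFIER_CHARACTERS = string.ascii_letters + string.digits + '_'
--
-- def getIdentifier(sourceFragment):
--     identifierChars = []
--     tailIter = iter(sourceFragment)
--     tail = ''
--     for c in tailIter:
--         if c not in IDENTIFIER_CHARACTERS:
--             tail = c
--             break
--         identifierChars.append(c)
--     identifier = ''.join(identifierChars)
--     tail += ''.join(tailIter)
--     return (identifier,tail)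
-- ===== SOURCE B (Python) =====
-- import re
--
-- _IDENT_RUN = re.compile(r'[A-Za-z0-9_]*')
--
-- def getIdentifier(sourceFragment):
--     m = _IDENT_RUN.match(sourceFragment)
--     return (m.group(), sourceFragment[m.end():])
-- ===== Notes on version B (the rewrite author's own statement) =====
-- stated objective: idiomatic
-- what changed: Replaced the explicit accumulate-and-break loop over a character iterator with a single regex match of the maximal leading [A-Za-z0-9_] run plus one slice for the tail.
import Mathlib
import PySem

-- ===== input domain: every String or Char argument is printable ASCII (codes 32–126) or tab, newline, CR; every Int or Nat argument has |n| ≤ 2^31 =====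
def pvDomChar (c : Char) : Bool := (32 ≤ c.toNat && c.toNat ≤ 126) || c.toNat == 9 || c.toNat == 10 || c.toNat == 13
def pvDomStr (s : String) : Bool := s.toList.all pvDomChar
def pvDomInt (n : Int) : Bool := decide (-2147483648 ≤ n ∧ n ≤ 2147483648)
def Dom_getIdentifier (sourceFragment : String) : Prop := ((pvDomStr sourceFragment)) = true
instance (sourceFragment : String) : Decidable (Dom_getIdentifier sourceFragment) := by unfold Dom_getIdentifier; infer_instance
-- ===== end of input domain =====

-- B replaces A's accumulate-and-break loop with a single maximal-leading-run match (regex) and a slice; objective: idiomatic.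

-- ===== PORT A =====
-- 'c in IDENTIFIER_CHARACTERS' (= ascii_letters + digits + '_')
def pvIdentCharA (c : Char) : Bool :=
  ('a' ≤ c && c ≤ 'z') || ('A' ≤ c && c ≤ 'Z') || ('0' ≤ c && c ≤ '9') || c == '_'

-- the for-loop with break: accumulates identifierChars, on break tail = c ++ rest of iterator
def pvLoopA (identifierChars : List Char) : List Char → List Char × List Char
  | [] => (identifierChars.reverse, [])
  | c :: rest =>
      if !pvIdentCharA c then (identifierChars.reverse, c :: rest)
      else pvLoopA (c :: identifierChars) rest

def getIdentifier (sourceFragment : String) : String × String :=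
  let p := pvLoopA [] sourceFragment.toList
  (String.ofList p.1, String.ofList p.2)

-- ===== PORT B =====
-- re.match('[A-Za-z0-9_]*', s): maximal leading run of the class, then slice the tail
def pvIdentClassB (c : Char) : Bool :=
  ('A' ≤ c && c ≤ 'Z') || ('a' ≤ c && c ≤ 'z') || ('0' ≤ c && c ≤ '9') || c == '_'

def getIdentifier_alt (sourceFragment : String) : String × String :=
  let l := sourceFragment.toList
  (String.ofList (l.takeWhile pvIdentClassB), String.ofList (l.dropWhile pvIdentClassB))

-- ===== PRECONDITION & SPEC =====
def Spec_getIdentifier (sourceFragment : String) (out : String × String) : Prop := out = getIdentifier_alt sourceFragment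
instance (sourceFragment : String) (out : String × String) : Decidable (Spec_getIdentifier sourceFragment out) := by unfold Spec_getIdentifier; infer_instance

-- ===== CLAIM (what is proved, stated in full; the proofs are below) =====
def Claim_equal_getIdentifier : Prop := ∀ (sourceFragment : String), Dom_getIdentifier sourceFragment → Spec_getIdentifier sourceFragment (getIdentifier sourceFragment)

-- ===== LEMMAS AND PROOFS =====
theorem pvIdentChar_eq (c : Char) : pvIdentCharA c = pvIdentClassB c := by
  simp only [pvIdentCharA, pvIdentClassB]
  rcases Bool.eq_false_or_eq_true ('a' ≤ c && c ≤ 'z') with h | h <;>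
    rcases Bool.eq_false_or_eq_true ('A' ≤ c && c ≤ 'Z') with h2 | h2 <;>
    simp [h, h2]

theorem pvLoopA_spec (l acc : List Char) :
    pvLoopA acc l = (acc.reverse ++ l.takeWhile pvIdentClassB, l.dropWhile pvIdentClassB) := by
  induction l generalizing acc with
  | nil => simp [pvLoopA]
  | cons c rest ih =>
      simp only [pvLoopA, pvIdentChar_eq, List.takeWhile, List.dropWhile]
      rcases Bool.eq_false_or_eq_true (pvIdentClassB c) with h | h
      · simp [h, ih]
      · simp [h]

-- ===== VERDICT (by name: the statement is the Claim_ definition above) =====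
theorem getIdentifier_spec : Claim_equal_getIdentifier := by
  intro s _
  unfold Spec_getIdentifier getIdentifier getIdentifier_alt
  simp [pvLoopA_spec]
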